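-- pv_equiv track=rewrite | github.com/andrabogildea/problems | problem1/problem_1.py | count_digit_occurence
-- ===== SOURCE A (Python) =====
-- def count_digit_occurence(nr):
--     zero_ord = ord('0')
--     nine_ord = ord('9')
--     counters = [0] * 10
--     for letter in nr:
--         if zero_ord <= ord(letter) <= nine_ord:
--             counters[int(letter)] += 1
--     return counters
-- ===== SOURCE B (Python) =====
-- def count_digit_occurence(nr):
--     return [nr.count(str(d)) for d in range(10)]
-- ===== Notes on version B (the rewrite author's own statement) =====
-- stated objective: idiomatic
-- what changed: Replaces A's single char-major pass with an ord-range test and a mutable counter array by a digit-major comprehension that rescans the string once per digit with str.count.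
import Mathlib
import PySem

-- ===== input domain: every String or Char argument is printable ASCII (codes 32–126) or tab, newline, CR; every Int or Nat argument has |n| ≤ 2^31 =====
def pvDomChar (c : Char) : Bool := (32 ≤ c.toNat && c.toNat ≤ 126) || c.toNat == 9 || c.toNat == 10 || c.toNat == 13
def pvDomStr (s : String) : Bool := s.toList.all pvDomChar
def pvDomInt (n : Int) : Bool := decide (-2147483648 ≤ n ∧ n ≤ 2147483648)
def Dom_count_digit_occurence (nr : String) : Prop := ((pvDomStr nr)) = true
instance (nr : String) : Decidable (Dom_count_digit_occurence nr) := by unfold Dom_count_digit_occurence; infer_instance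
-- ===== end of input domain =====

-- B counts digit-major (ten str.count scans) instead of A's char-major pass into a counter array; same values, idiomatic rather than faster.

-- ===== PORT A =====
-- 'counters[int(letter)] += 1': for a single digit character, int(letter) = toNat - 48,
-- always in [0,9], so List.set/getD with default 0 is exact here.
def count_digit_occurence (nr : String) : List Int :=
  let zero_ord : Nat := ('0').toNat
  let nine_ord : Nat := ('9').toNat
  nr.toList.foldl
    (fun counters letter =>
      if zero_ord ≤ letter.toNat ∧ letter.toNat ≤ nine_ord then
        counters.set (letter.toNat - zero_ord) (counters.getD (letter.toNat - zero_ord) 0 + 1)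
      else counters)
    (List.replicate 10 (0 : Int))

-- ===== PORT B =====
def count_digit_occurence_alt (nr : String) : List Int :=
  (PySem.List.pyRange 0 10 1).map (fun d => (PySem.Str.count nr (PySem.Int.toStr d) : Int))

-- ===== PRECONDITION & SPEC =====
def Spec_count_digit_occurence (nr : String) (out : List Int) : Prop := out = count_digit_occurence_alt nr
instance (nr : String) (out : List Int) : Decidable (Spec_count_digit_occurence nr out) := by unfold Spec_count_digit_occurence; infer_instance

-- ===== CLAIM (what is proved, stated in full; the proofs are below) =====
def Claim_equal_count_digit_occurence : Prop := ∀ (nr : String), Dom_count_digit_occurence nr → Spec_count_digit_occurence nr (count_digit_occurence nr)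

-- ===== LEMMAS AND PROOFS =====

theorem char_toNat_inj (x c : Char) (h : x.toNat = c.toNat) : x = c := by
  have hv : x.val = c.val := by
    have hx := h
    unfold Char.toNat at hx
    exact UInt32.toNat_inj.mp hx
  exact Char.ext hv

-- Chars.count with a single-character needle is plain character count.
theorem count_go_single (c : Char) : ∀ (fuel : Nat) (l : List Char) (acc : Nat),
    l.length ≤ fuel → PySem.Chars.count.go [c] fuel l acc = acc + l.count c := by
  intro fuel
  induction fuel with
  | zero =>
    intro l acc h
    have : l = [] := List.eq_nil_of_length_eq_zero (Nat.le_zero.mp h)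
    subst this
    simp [PySem.Chars.count.go]
  | succ n ih =>
    intro l acc h
    cases l with
    | nil => simp [PySem.Chars.count.go]
    | cons x t =>
      simp only [PySem.Chars.count.go]
      have ht : t.length ≤ n := by simpa using h
      by_cases hx : c = x
      · subst hx
        simp [List.isPrefixOf, ih _ _ ht]
        omega
      · have hp : ([c].isPrefixOf (x :: t)) = false := by
          simp [List.isPrefixOf]
          exact fun hh => hx hh
        simp only [hp, Bool.false_eq_true, if_false, ih _ _ ht, List.count_cons]
        have : (x == c) = false := by
          simp
          exact fun hh => hx hh.symm
        simp [this]

theorem count_single (l : List Char) (c : Char) :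
    PySem.Chars.count l [c] = l.count c := by
  simp only [PySem.Chars.count, List.isEmpty_cons, Bool.false_eq_true, if_false]
  have := count_go_single c l.length l 0 (le_refl _)
  omega

-- counting a character = counting by code point
theorem count_char_eq_countP (l : List Char) (c : Char) :
    l.count c = l.countP (fun x => x.toNat == c.toNat) := by
  rw [List.count_eq_countP]
  apply List.countP_congr
  intro x _
  simp only [beq_iff_eq]
  constructor
  · rintro rfl; rfl
  · intro h; exact char_toNat_inj x c h

-- set on a map over range 10 stays a map over range 10
theorem set_map_range (g : Nat → Int) (d : Nat) (_hd : d < 10) (v : Int) :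
    ((List.range 10).map g).set d v
      = (List.range 10).map (fun i => if i = d then v else g i) := by
  apply List.ext_getElem
  · simp
  · intro i h1 h2
    simp only [List.getElem_set, List.getElem_map, List.getElem_range]
    simp at h1
    split_ifs with h3 h4 h4
    · rfl
    · exact absurd h3.symm h4
    · exact absurd h4.symm h3
    · rfl

theorem getD_map_range (g : Nat → Int) (d : Nat) (hd : d < 10) :
    ((List.range 10).map g).getD d 0 = g d := by
  have h : d < ((List.range 10).map g).length := by simpa using hd
  rw [List.getD_eq_getElem _ _ h]
  simp

-- loop invariant for A's fold
theorem loopA (l : List Char) : ∀ (g : Nat → Int),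
    l.foldl
      (fun counters letter =>
        if ('0').toNat ≤ letter.toNat ∧ letter.toNat ≤ ('9').toNat then
          counters.set (letter.toNat - ('0').toNat) (counters.getD (letter.toNat - ('0').toNat) 0 + 1)
        else counters)
      ((List.range 10).map g)
      = (List.range 10).map (fun i => g i + (l.countP (fun c => c.toNat == 48 + i) : Int)) := by
  induction l with
  | nil =>
    intro g
    simp only [List.foldl_nil, List.countP_nil, Nat.cast_zero, add_zero]
  | cons c t ih =>
    intro g
    have h48 : ('0').toNat = 48 := rfl
    have h57 : ('9').toNat = 57 := rfl
    simp only [h48, h57] at ih ⊢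
    simp only [List.foldl_cons]
    by_cases hc : 48 ≤ c.toNat ∧ c.toNat ≤ 57
    · have hd : c.toNat - 48 < 10 := by omega
      rw [if_pos hc, getD_map_range g _ hd, set_map_range g _ hd]
      rw [ih (fun i => if i = c.toNat - 48 then g (c.toNat - 48) + 1 else g i)]
      apply List.map_congr_left
      intro i hi
      simp only [List.mem_range] at hi
      by_cases he : i = c.toNat - 48
      · subst he
        have hcd : (c.toNat == 48 + (c.toNat - 48)) = true := by simp; omega
        simp only [List.countP_cons, hcd, if_true]
        push_cast
        ring
      · have hcd : (c.toNat == 48 + i) = false := by simp; omega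
        simp only [if_neg he, List.countP_cons, hcd, Bool.false_eq_true, if_false, Nat.add_zero]
    · rw [if_neg hc, ih]
      apply List.map_congr_left
      intro i hi
      simp only [List.mem_range] at hi
      have hcd : (c.toNat == 48 + i) = false := by simp; omega
      simp only [List.countP_cons, hcd, Bool.false_eq_true, if_false, Nat.add_zero]

theorem A_eq (nr : String) :
    count_digit_occurence nr
      = (List.range 10).map (fun i => ((nr.toList.countP (fun c => c.toNat == 48 + i)) : Int)) := by
  have h0 : (List.replicate 10 (0 : Int)) = (List.range 10).map (fun _ => (0 : Int)) := by decide
  unfold count_digit_occurence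
  simp only [h0]
  rw [loopA nr.toList (fun _ => 0)]
  simp

theorem B_eq (nr : String) :
    count_digit_occurence_alt nr
      = (List.range 10).map (fun i => ((nr.toList.countP (fun c => c.toNat == 48 + i)) : Int)) := by
  unfold count_digit_occurence_alt
  have hr : PySem.List.pyRange 0 10 1 = [0,1,2,3,4,5,6,7,8,9] := by decide
  have hR : List.range 10 = [0,1,2,3,4,5,6,7,8,9] := by decide
  rw [hr, hR]
  simp only [List.map]
  have key : ∀ (d : Char), PySem.Chars.count nr.toList [d]
      = nr.toList.countP (fun x => x.toNat == d.toNat) := by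
    intro d
    rw [count_single, count_char_eq_countP]
  norm_num [PySem.Str.count_eq]
  refine ⟨?_, ?_, ?_, ?_, ?_, ?_, ?_, ?_, ?_, ?_⟩ <;>
    simp only [key, show PySem.Int.toChars 0 = ['0'] from rfl, show PySem.Int.toChars 1 = ['1'] from rfl, show PySem.Int.toChars 2 = ['2'] from rfl, show PySem.Int.toChars 3 = ['3'] from rfl, show PySem.Int.toChars 4 = ['4'] from rfl, show PySem.Int.toChars 5 = ['5'] from rfl, show PySem.Int.toChars 6 = ['6'] from rfl, show PySem.Int.toChars 7 = ['7'] from rfl, show PySem.Int.toChars 8 = ['8'] from rfl, show PySem.Int.toChars 9 = ['9'] from rfl, show ('0').toNat = 48 from rfl, show ('1').toNat = 49 from rfl, show ('2').toNat = 50 from rfl, show ('3').toNat = 51 from rfl, show ('4').toNat = 52 from rfl, show ('5').toNat = 53 from rfl, show ('6').toNat = 54 from rfl, show ('7').toNat = 55 from rfl, show ('8').toNat = 56 from rfl, show ('9').toNat = 57 from rfl]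

-- ===== VERDICT (by name: the statement is the Claim_ definition above) =====
theorem count_digit_occurence_spec : Claim_equal_count_digit_occurence := by
  intro nr _
  show count_digit_occurence nr = count_digit_occurence_alt nr
  rw [A_eq, B_eq]
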